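-- pv_equiv track=rewrite | github.com/latoma/OhTe-harjoitustyo | src/game/scoreboard.py | calculate_two_pairs_score
-- ===== SOURCE A (Python) =====
-- def calculate_two_pairs_score(dice_values):
--     pairs = set()
--     for value in dice_values:
--         if 2 <= dice_values.count(value) <= 3:
--             pairs.add(value)
--     if len(pairs) == 2:
--         return sum(pairs) * 2
--     return 0
-- ===== SOURCE B (Python) =====
-- def calculate_two_pairs_score(dice_values):
--     ordered = sorted(dice_values)
--     pairs = []
--     i, n = 0, len(ordered)
--     while i < n:
--         # consume one maximal run of equal values
--         j = i + 1
--         while j < n and ordered[j] == ordered[i]: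
--             j += 1
--         if 2 <= j - i <= 3:
--             pairs.append(ordered[i])
--         i = j
--     if len(pairs) == 2:
--         return sum(pairs) * 2
--     return 0
-- ===== Notes on version B (the rewrite author's own statement) =====
-- stated objective: faster
-- what changed: B sorts the hand once and scans it in a single pass, consuming maximal runs of equal values and selecting run values whose run length is 2 or 3, instead of A's per-die rescans of the whole hand with list.count into a set.
import Mathlib
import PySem

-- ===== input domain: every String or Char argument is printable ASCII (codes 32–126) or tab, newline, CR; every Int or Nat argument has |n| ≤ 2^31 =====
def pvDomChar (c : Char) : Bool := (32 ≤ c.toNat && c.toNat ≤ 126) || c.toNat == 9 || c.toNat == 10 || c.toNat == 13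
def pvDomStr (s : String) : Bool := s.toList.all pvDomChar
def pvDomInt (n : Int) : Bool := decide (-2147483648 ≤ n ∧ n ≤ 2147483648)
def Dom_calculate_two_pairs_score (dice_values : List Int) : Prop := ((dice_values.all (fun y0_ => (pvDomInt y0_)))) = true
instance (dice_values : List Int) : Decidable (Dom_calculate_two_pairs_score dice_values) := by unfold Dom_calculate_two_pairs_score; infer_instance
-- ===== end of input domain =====

-- B sorts the hand and scans it once, consuming maximal runs of equal values and
-- selecting run values whose run length is 2 or 3, instead of A's per-die rescans
-- of the whole hand with list.count (objective: faster, measured).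

-- ===== PORT A =====
def calculate_two_pairs_score (dice_values : List Int) : Int :=
  let pairs : PySem.Set Int :=
    dice_values.foldl
      (fun s v =>
        if 2 ≤ PySem.List.count dice_values v ∧ PySem.List.count dice_values v ≤ 3 then
          PySem.Set.add s v
        else s)
      PySem.Set.empty
  if pairs.length = 2 then pairs.sum * 2 else 0

-- ===== PORT B =====
-- B's outer while loop consumes one maximal run of equal values per iteration
-- (the inner while advances j past the run); transcribed as structural recursion
-- on the remaining suffix: takeWhile counts the run (j - i), dropWhile is ordered[j:]
def pvRunsB : List Int → List Int
  | [] => []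
  | v :: tl =>
    let run : Int := 1 + (tl.takeWhile (fun x => x == v)).length
    let rest := pvRunsB (tl.dropWhile (fun x => x == v))
    if 2 ≤ run ∧ run ≤ 3 then v :: rest else rest
termination_by l => l.length
decreasing_by
  simpa [Nat.lt_succ_iff] using (tl.dropWhile_sublist (fun x => x == v)).length_le

def calculate_two_pairs_score_alt (dice_values : List Int) : Int :=
  let pairs := pvRunsB (PySem.List.sorted dice_values (fun x => x) false)
  if pairs.length = 2 then pairs.sum * 2 else 0

-- ===== PRECONDITION & SPEC =====
def Spec_calculate_two_pairs_score (dice_values : List Int) (out : Int) : Prop := out = calculate_two_pairs_score_alt dice_values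
instance (dice_values : List Int) (out : Int) : Decidable (Spec_calculate_two_pairs_score dice_values out) := by unfold Spec_calculate_two_pairs_score; infer_instance

-- ===== CLAIM (what is proved, stated in full; the proofs are below) =====
def Claim_equal_calculate_two_pairs_score : Prop := ∀ (dice_values : List Int), Dom_calculate_two_pairs_score dice_values → Spec_calculate_two_pairs_score dice_values (calculate_two_pairs_score dice_values)

-- ===== LEMMAS AND PROOFS =====

-- characterisation of B's run scan on a sorted list: no duplicates, and membership
-- is exactly "occurs in l with count 2 or 3"
-- the head of dropWhile (== v) is not v
lemma dropWhile_head_ne (v : Int) (tl : List Int) (w : Int) (t : List Int)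
    (h : tl.dropWhile (fun x => x == v) = w :: t) : w ≠ v := by
  induction tl with
  | nil => simp at h
  | cons x xs ih =>
    by_cases hx : (x == v) = true
    · simp only [List.dropWhile_cons, hx, if_true] at h; exact ih h
    · simp only [List.dropWhile_cons, hx, if_false, Bool.false_eq_true] at h
      cases h; simpa using hx

-- one step of the run scan, assuming the invariant for the remainder
lemma runsB_step (v : Int) (tl : List Int)
    (ih : (tl.dropWhile (fun x => x == v)).Pairwise (· ≤ ·) →
      (pvRunsB (tl.dropWhile (fun x => x == v))).Nodup ∧
      ∀ a, a ∈ pvRunsB (tl.dropWhile (fun x => x == v)) ↔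
        a ∈ tl.dropWhile (fun x => x == v) ∧
        2 ≤ (tl.dropWhile (fun x => x == v)).count a ∧
        (tl.dropWhile (fun x => x == v)).count a ≤ 3)
    (hs : (v :: tl).Pairwise (· ≤ ·)) :
    (pvRunsB (v :: tl)).Nodup ∧
    ∀ a, a ∈ pvRunsB (v :: tl) ↔
      a ∈ (v :: tl) ∧ 2 ≤ (v :: tl).count a ∧ (v :: tl).count a ≤ 3 := by
    set tw := tl.takeWhile (fun x => x == v) with htw
    set dw := tl.dropWhile (fun x => x == v) with hdw
    have hv : ∀ x ∈ tl, v ≤ x := fun x hx => List.rel_of_pairwise_cons hs hx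
    have hs' : tl.Pairwise (· ≤ ·) := hs.of_cons
    have hdws : dw.Pairwise (· ≤ ·) := hs'.sublist (tl.dropWhile_sublist _)
    have ihs := ih hdws
    -- every element of dw is > v, in particular v ∉ dw
    have hgt : ∀ x ∈ dw, v < x := by
      cases hd : dw with
      | nil => simp
      | cons w t =>
        intro x hx
        have hwne : w ≠ v := dropWhile_head_ne v tl w t (hdw ▸ hd)
        have hwmem : w ∈ tl := (tl.dropWhile_sublist _).mem (by rw [← hdw, hd]; simp)
        have hvw : v < w := lt_of_le_of_ne (hv w hwmem) (Ne.symm hwne)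
        rcases List.mem_cons.mp hx with rfl | hxt
        · exact hvw
        · exact lt_of_lt_of_le hvw (List.rel_of_pairwise_cons (hd ▸ hdws) hxt)
    have hvnot : v ∉ dw := fun h => lt_irrefl v (hgt v h)
    -- all of tw equals v
    have htwv : ∀ x ∈ tw, x = v := fun x hx => by
      simpa using List.mem_takeWhile_imp hx
    have hsplit : tl = tw ++ dw := (List.takeWhile_append_dropWhile (p := fun x => x == v) (l := tl)).symm
    -- counts in v :: tl
    have hcv : (v :: tl).count v = 1 + tw.length := by
      rw [List.count_cons_self, hsplit, List.count_append,
        List.count_eq_length.mpr (fun b hb => (htwv b hb).symm),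
        List.count_eq_zero.mpr hvnot]
      omega
    have hca : ∀ a, a ≠ v → (v :: tl).count a = dw.count a := by
      intro a ha
      rw [List.count_cons_of_ne (Ne.symm ha), hsplit, List.count_append,
        List.count_eq_zero.mpr (fun hmem => ha (htwv a hmem))]
      omega
    have hmema : ∀ a, a ≠ v → (a ∈ v :: tl ↔ a ∈ dw) := by
      intro a ha
      rw [List.mem_cons, hsplit, List.mem_append]
      constructor
      · rintro (rfl | hm | hm)
        · exact absurd rfl ha
        · exact absurd (htwv a hm) ha
        · exact hm
      · exact fun h => Or.inr (Or.inr h)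
    -- unfold one step of pvRunsB
    have hrun : pvRunsB (v :: tl)
        = if 2 ≤ (1 + (tw.length : Int)) ∧ (1 + (tw.length : Int)) ≤ 3
          then v :: pvRunsB dw else pvRunsB dw := by
      rw [pvRunsB]
    have hsubrest : ∀ a ∈ pvRunsB dw, a ∈ dw := fun a ha => ((ihs.2 a).mp ha).1
    by_cases hc : 2 ≤ (1 + (tw.length : Int)) ∧ (1 + (tw.length : Int)) ≤ 3
    · rw [hrun, if_pos hc]
      constructor
      · exact List.nodup_cons.mpr ⟨fun h => hvnot (hsubrest v h), ihs.1⟩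
      · intro a
        by_cases ha : a = v
        · subst ha
          have hn2 : 2 ≤ 1 + tw.length := by exact_mod_cast hc.1
          have hn3 : 1 + tw.length ≤ 3 := by exact_mod_cast hc.2
          constructor
          · intro _
            exact ⟨List.mem_cons_self, by rw [hcv]; omega, by rw [hcv]; omega⟩
          · intro _
            exact List.mem_cons_self
        · rw [List.mem_cons, or_iff_right ha, ihs.2 a, hmema a ha, hca a ha]
    · rw [hrun, if_neg hc]
      refine ⟨ihs.1, fun a => ?_⟩
      by_cases ha : a = v
      · subst ha
        rw [iff_false_intro (fun h => hvnot (hsubrest a h)), false_iff]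
        rintro ⟨-, h2, h3⟩
        rw [hcv] at h2 h3
        exact hc ⟨by exact_mod_cast h2, by exact_mod_cast h3⟩
      · rw [ihs.2 a, hmema a ha, hca a ha]

lemma runsB_spec (l : List Int) (hs : l.Pairwise (· ≤ ·)) :
    (pvRunsB l).Nodup ∧ ∀ a, a ∈ pvRunsB l ↔ a ∈ l ∧ 2 ≤ l.count a ∧ l.count a ≤ 3 := by
  revert hs
  induction l using pvRunsB.induct with
  | case1 => intro _; simp [pvRunsB]
  | case2 v tl _ _ ih => exact runsB_step v tl ih
  | case3 v tl _ _ ih => exact runsB_step v tl ih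

-- A's foldl builds set(filter q dice_values)
lemma pairsA_eq (xs : List Int) :
    (xs.foldl
      (fun s v =>
        if 2 ≤ PySem.List.count xs v ∧ PySem.List.count xs v ≤ 3 then
          PySem.Set.add s v
        else s)
      PySem.Set.empty)
    = PySem.Set.ofList (xs.filter (fun v => decide (2 ≤ PySem.List.count xs v ∧ PySem.List.count xs v ≤ 3))) := by
  rw [PySem.List.foldl_ite_eq_foldl_filter]; exact (PySem.Set.ofList_eq_foldl _).symm

-- the two qualifying-value lists are permutations of each other
lemma pairs_perm (xs : List Int) :
    (xs.foldl
      (fun s v =>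
        if 2 ≤ PySem.List.count xs v ∧ PySem.List.count xs v ≤ 3 then
          PySem.Set.add s v
        else s)
      PySem.Set.empty).Perm
    (pvRunsB (PySem.List.sorted xs (fun x => x) false)) := by
  rw [pairsA_eq]
  have hperm : (PySem.List.sorted xs (fun x => x) false).Perm xs :=
    PySem.List.sorted_perm xs (fun x => x) false
  have hspec := runsB_spec (PySem.List.sorted xs (fun x => x) false)
    (PySem.List.sorted_pairwise xs (fun x => x))
  refine (List.perm_ext_iff_of_nodup (PySem.Set.nodup_ofList _) hspec.1).mpr ?_
  intro a
  rw [PySem.Set.mem_ofList, List.mem_filter, hspec.2 a, hperm.mem_iff, hperm.count_eq]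
  constructor
  · rintro ⟨hm, hq⟩
    have hq' := of_decide_eq_true hq
    refine ⟨hm, ?_, ?_⟩
    · have := hq'.1; simp only [PySem.List.count] at this; exact_mod_cast this
    · have := hq'.2; simp only [PySem.List.count] at this; exact_mod_cast this
  · rintro ⟨hm, h2, h3⟩
    refine ⟨hm, decide_eq_true ?_⟩
    constructor <;> simp only [PySem.List.count] <;> [exact_mod_cast h2; exact_mod_cast h3]

-- ===== VERDICT (by name: the statement is the Claim_ definition above) =====
theorem calculate_two_pairs_score_spec : Claim_equal_calculate_two_pairs_score := by
  intro xs _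
  unfold Spec_calculate_two_pairs_score calculate_two_pairs_score calculate_two_pairs_score_alt
  have h := pairs_perm xs
  simp only []
  rw [h.length_eq, h.sum_eq]
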